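-- pv_equiv track=rewrite | github.com/samirsuperman786/Study112 | Quizzes/Recursion/CT-F16-2.py | ct2
-- ===== SOURCE A (Python) =====
-- import copy
--
-- def ct2(n):
--     if (n <= 4): # note the unusual condition
--         return [ [ n ] ]
--     else:
--         L = ct2(n//2)
--         M = copy.copy(L)
--         for	a in L: M += [[n] + a]
--         return M
-- ===== SOURCE B (Python) =====
-- def ct2(n):
--     # Iterative: precompute the descending chain of arguments, then double level by level.
--     vals = []
--     m = n
--     while m > 4:
--         vals.append(m)
--         m //= 2
--     L = [[m]]
--     for v in reversed(vals):
--         L = L + [[v] + a for a in L]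
--     return L
-- ===== Notes on version B (the rewrite author's own statement) =====
-- stated objective: alternative
-- what changed: Replaces the recursion with an explicit loop: the chain of halved arguments is collected first, then the list is doubled level by level over that chain in reverse.
import Mathlib
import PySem

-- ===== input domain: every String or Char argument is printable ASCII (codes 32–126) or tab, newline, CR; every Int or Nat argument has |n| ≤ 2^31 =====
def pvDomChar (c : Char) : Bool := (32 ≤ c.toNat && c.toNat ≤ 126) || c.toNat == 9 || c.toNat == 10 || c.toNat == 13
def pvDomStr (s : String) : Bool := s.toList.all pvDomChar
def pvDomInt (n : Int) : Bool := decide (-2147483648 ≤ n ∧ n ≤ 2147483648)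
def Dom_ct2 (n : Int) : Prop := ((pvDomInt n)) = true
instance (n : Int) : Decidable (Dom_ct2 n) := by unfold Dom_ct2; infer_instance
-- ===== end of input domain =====

-- B replaces the recursion by an explicit loop over the precomputed chain of halved arguments (alternative decomposition, same cost).

-- ===== PORT A =====
-- termination helper: n//2 shrinks n.toNat when n > 4
theorem ct2_floordiv_lt (n : Int) (h : ¬ n ≤ 4) : (PySem.Int.floordiv n 2).toNat < n.toNat := by
  simp only [PySem.Int.floordiv]
  have h2 : n.fdiv 2 = n / 2 := Int.fdiv_eq_ediv_of_nonneg n (by norm_num)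
  rw [h2]; omega

def ct2 (n : Int) : List (List Int) :=
  if n ≤ 4 then [[n]]
  else
    let L := ct2 (PySem.Int.floordiv n 2)
    L.foldl (fun M a => M ++ [n :: a]) L
termination_by n.toNat
decreasing_by exact ct2_floordiv_lt n (by assumption)

-- ===== PORT B =====
-- the while loop: returns (vals, m) where vals is the chain of values > 4 and m the final base value
def ct2Chain (m : Int) : List Int × Int :=
  if m > 4 then
    let (vs, b) := ct2Chain (PySem.Int.floordiv m 2)
    (m :: vs, b)
  else ([], m)
termination_by m.toNat
decreasing_by exact ct2_floordiv_lt m (by omega)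

def ct2_alt (n : Int) : List (List Int) :=
  let (vals, m) := ct2Chain n
  vals.reverse.foldl (fun L v => L ++ L.map (fun a => v :: a)) [[m]]

-- ===== PRECONDITION & SPEC =====
def Spec_ct2 (n : Int) (out : List (List Int)) : Prop := out = ct2_alt n
instance (n : Int) (out : List (List Int)) : Decidable (Spec_ct2 n out) := by unfold Spec_ct2; infer_instance

-- ===== CLAIM (what is proved, stated in full; the proofs are below) =====
def Claim_equal_ct2 : Prop := ∀ (n : Int), Dom_ct2 n → Spec_ct2 n (ct2 n)

-- ===== LEMMAS AND PROOFS =====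

theorem foldl_append_singleton (f : List Int → List Int) :
    ∀ (L acc : List (List Int)), L.foldl (fun M a => M ++ [f a]) acc = acc ++ L.map f := by
  intro L
  induction L with
  | nil => simp
  | cons a L ih => intro acc; simp [List.foldl, ih]

theorem ct2_eq_alt (n : Int) : ct2 n = ct2_alt n := by
  induction n using ct2.induct with
  | case1 n h =>
    rw [ct2, ct2_alt, ct2Chain]
    simp [h, show ¬ n > 4 by omega]
  | case2 n h ih =>
    rw [ct2, ct2_alt, ct2Chain]
    simp only [if_neg h, if_pos (show n > 4 by omega)]
    rw [foldl_append_singleton]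
    rw [ih, ct2_alt]
    rcases hc : ct2Chain (PySem.Int.floordiv n 2) with ⟨vs, b⟩
    simp [List.foldl_append]

-- ===== VERDICT (by name: the statement is the Claim_ definition above) =====
theorem ct2_spec : Claim_equal_ct2 := by
  intro n _
  exact ct2_eq_alt n
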